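-- pv_equiv track=rewrite | github.com/Alejandro-vww/Arena-Gladiator | minion_of_the_mighty.py | tierras_dual_mono
-- ===== SOURCE A (Python) =====
-- def tierras_dual_mono(mano):
--     recuento = []
--     for tierra in mano:
--         if tierra == 73476:  # Senda
--             recuento.append('mono')
--         elif tierra == 77365:  # templo dragones
--             recuento.append('mono')
--         elif tierra == 69407:  # aplastador
--             recuento.append('dual')
--         elif tierra == 83949:  # Copperline
--             recuento.append('dual')
--         elif tierra == 82302:  # karplusana
--             recuento.append('dual')
--         elif tierra == 70755:  # templo
--             recuento.append('dual')
--             recuento.append('tempo')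
--     return recuento.count('dual'), recuento.count('mono'), recuento.count('tempo')
-- ===== SOURCE B (Python) =====
-- # Table-driven single pass: one dict lookup per card, three running totals;
-- # no intermediate list and no .count() scans.
-- _MAPPING = {
--     73476: (0, 1, 0),  # Senda
--     77365: (0, 1, 0),  # templo dragones
--     69407: (1, 0, 0),  # aplastador
--     83949: (1, 0, 0),  # Copperline
--     82302: (1, 0, 0),  # karplusana
--     70755: (1, 0, 1),  # templo
-- }
--
-- def tierras_dual_mono(mano):
--     dual = mono = tempo = 0
--     for tierra in mano:
--         d, m, t = _MAPPING.get(tierra, (0, 0, 0))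
--         dual += d
--         mono += m
--         tempo += t
--     return dual, mono, tempo
-- ===== Notes on version B (the rewrite author's own statement) =====
-- stated objective: simpler
-- what changed: Replaces the if/elif cascade that builds an intermediate tag list plus three .count() scans with a single table-driven pass accumulating the three totals directly from a land-id -> (dual,mono,tempo) dict.
import Mathlib
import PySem

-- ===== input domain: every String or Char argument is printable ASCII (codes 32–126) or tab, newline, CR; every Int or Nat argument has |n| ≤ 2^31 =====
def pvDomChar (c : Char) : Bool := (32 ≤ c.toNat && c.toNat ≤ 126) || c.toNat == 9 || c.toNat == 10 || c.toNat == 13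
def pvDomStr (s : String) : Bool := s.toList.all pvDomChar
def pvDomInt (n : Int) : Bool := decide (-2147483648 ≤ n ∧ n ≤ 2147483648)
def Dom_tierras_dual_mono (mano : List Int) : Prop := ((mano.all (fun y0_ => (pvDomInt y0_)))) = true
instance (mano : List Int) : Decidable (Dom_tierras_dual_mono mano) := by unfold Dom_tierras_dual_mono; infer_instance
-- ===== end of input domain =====

-- B replaces A's if/elif cascade + tag list + three .count() scans by one
-- table-driven pass accumulating the three totals (objective: simpler).

-- ===== PORT A =====
-- the if/elif body of A's loop
def pvStepA (recuento : List String) (tierra : Int) : List String :=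
  if tierra == 73476 then recuento ++ ["mono"]
  else if tierra == 77365 then recuento ++ ["mono"]
  else if tierra == 69407 then recuento ++ ["dual"]
  else if tierra == 83949 then recuento ++ ["dual"]
  else if tierra == 82302 then recuento ++ ["dual"]
  else if tierra == 70755 then recuento ++ ["dual"] ++ ["tempo"]
  else recuento

def tierras_dual_mono (mano : List Int) : Int × Int × Int :=
  let recuento := mano.foldl pvStepA []
  (PySem.List.count recuento "dual", PySem.List.count recuento "mono",
   PySem.List.count recuento "tempo")

-- ===== PORT B =====
def pvMapping : PySem.Dict Int (Int × Int × Int) :=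
  PySem.Dict.ofList [(73476, (0, 1, 0)), (77365, (0, 1, 0)), (69407, (1, 0, 0)),
                     (83949, (1, 0, 0)), (82302, (1, 0, 0)), (70755, (1, 0, 1))]

def pvStepB (acc : Int × Int × Int) (tierra : Int) : Int × Int × Int :=
  let c := pvMapping.getD tierra (0, 0, 0)
  (acc.1 + c.1, acc.2.1 + c.2.1, acc.2.2 + c.2.2)

def tierras_dual_mono_alt (mano : List Int) : Int × Int × Int :=
  mano.foldl pvStepB (0, 0, 0)

-- ===== PRECONDITION & SPEC =====
def Spec_tierras_dual_mono (mano : List Int) (out : Int × Int × Int) : Prop := out = tierras_dual_mono_alt mano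
instance (mano : List Int) (out : Int × Int × Int) : Decidable (Spec_tierras_dual_mono mano out) := by unfold Spec_tierras_dual_mono; infer_instance

-- ===== CLAIM (what is proved, stated in full; the proofs are below) =====
def Claim_equal_tierras_dual_mono : Prop := ∀ (mano : List Int), Dom_tierras_dual_mono mano → Spec_tierras_dual_mono mano (tierras_dual_mono mano)

-- ===== LEMMAS AND PROOFS =====
-- the three counts of a tag list, as B's accumulator
def pvCnts (r : List String) : Int × Int × Int :=
  (PySem.List.count r "dual", PySem.List.count r "mono", PySem.List.count r "tempo")

lemma pvCnts_append (r : List String) (x : String) :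
    pvCnts (r ++ [x]) = ((pvCnts r).1 + (if x = "dual" then 1 else 0),
                         (pvCnts r).2.1 + (if x = "mono" then 1 else 0),
                         (pvCnts r).2.2 + (if x = "tempo" then 1 else 0)) := by
  simp [pvCnts, PySem.List.count_eq, List.count_append, List.count_singleton]

lemma pvStep_comm (r : List String) (t : Int) :
    pvCnts (pvStepA r t) = pvStepB (pvCnts r) t := by
  by_cases h1 : t = 73476
  · subst h1
    have : pvMapping.getD 73476 (0, 0, 0) = (0, 1, 0) := by decide
    simp [pvStepA, pvStepB, this, pvCnts_append]
  by_cases h2 : t = 77365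
  · subst h2
    have : pvMapping.getD 77365 (0, 0, 0) = (0, 1, 0) := by decide
    simp [pvStepA, pvStepB, this, pvCnts_append]
  by_cases h3 : t = 69407
  · subst h3
    have : pvMapping.getD 69407 (0, 0, 0) = (1, 0, 0) := by decide
    simp [pvStepA, pvStepB, this, pvCnts_append]
  by_cases h4 : t = 83949
  · subst h4
    have : pvMapping.getD 83949 (0, 0, 0) = (1, 0, 0) := by decide
    simp [pvStepA, pvStepB, this, pvCnts_append]
  by_cases h5 : t = 82302
  · subst h5
    have : pvMapping.getD 82302 (0, 0, 0) = (1, 0, 0) := by decide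
    simp [pvStepA, pvStepB, this, pvCnts_append]
  by_cases h6 : t = 70755
  · subst h6
    have : pvMapping.getD 70755 (0, 0, 0) = (1, 0, 1) := by decide
    have e : pvStepA r 70755 = (r ++ ["dual"]) ++ ["tempo"] := by simp [pvStepA]
    rw [e, pvCnts_append, pvCnts_append]
    simp [pvStepB, this]
  · have hd : pvMapping.getD t (0, 0, 0) = (0, 0, 0) := by
      have hm : pvMapping = PySem.Dict.mk [(73476, (0, 1, 0)), (77365, (0, 1, 0)), (69407, (1, 0, 0)),
          (83949, (1, 0, 0)), (82302, (1, 0, 0)), (70755, (1, 0, 1))] := by decide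
      rw [PySem.Dict.getD_eq_get?_getD, hm]
      simp only [PySem.Dict.get?_mk_cons, beq_iff_eq]
      rw [if_neg (by omega), if_neg (by omega), if_neg (by omega),
          if_neg (by omega), if_neg (by omega), if_neg (by omega)]
      rfl
    simp [pvStepA, pvStepB, h1, h2, h3, h4, h5, h6, hd]

lemma pvFold_comm (xs : List Int) : ∀ (r : List String),
    pvCnts (xs.foldl pvStepA r) = xs.foldl pvStepB (pvCnts r) := by
  induction xs with
  | nil => intro r; rfl
  | cons t xs ih =>
    intro r
    simp only [List.foldl_cons]
    rw [ih, pvStep_comm]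

-- ===== VERDICT (by name: the statement is the Claim_ definition above) =====
theorem tierras_dual_mono_spec : Claim_equal_tierras_dual_mono := by
  intro mano _
  show tierras_dual_mono mano = tierras_dual_mono_alt mano
  have h := pvFold_comm mano []
  simpa [tierras_dual_mono, tierras_dual_mono_alt, pvCnts] using h
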